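-- pv_equiv track=rewrite | github.com/duzaao/2-Semestre-BCC-IME-USP | python/ex17.py | GF2_span
-- ===== SOURCE A (Python) =====
-- def bin2list(x, t):
--     l = [int(d) for d in str(bin(x)) [2:]]
--     while(len(l) != t):
--         l = [0] + l
--     return l
--
-- def GF2_span (D,L):
--     resposta = set()
--     tamanho = len(L)
--     lamb = (2**tamanho) - 1
--     if (tamanho==0): #com a lista vazia de vetores de entrada, a função deve devolver o vetor nulo de GF(2).
--         return {set()} # caso o vetor for nulo, retorna set()
--
--
--     for i in range(lamb + 1):
--         c = bin2list(lamb, tamanho)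
--
--         u = sum([c[j]*L[j] for j in range(tamanho)])
--         resposta.add(u)
--         lamb = lamb - 1
--
--     return resposta
-- ===== SOURCE B (Python) =====
-- def GF2_span(D, L):
--     # incremental reachable-sum set, grown element by element (right to left,
--     # new sums first, so duplicates collapse the same way A's enumeration does)
--     sums = [0]
--     for x in reversed(L):
--         sums = list(dict.fromkeys([x + t for t in sums] + sums))
--     return set(sums)
-- ===== Notes on version B (the rewrite author's own statement) =====
-- stated objective: faster
-- what changed: A enumerates all 2^n bitmasks, converting each to a padded binary digit list via string formatting and summing an n-term dot product per mask; B grows the reachable-sum set incrementally, one list element at a time, deduplicating at every step, so collapsed sums are never re-expanded and no per-mask digit lists are built.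
import Mathlib
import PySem

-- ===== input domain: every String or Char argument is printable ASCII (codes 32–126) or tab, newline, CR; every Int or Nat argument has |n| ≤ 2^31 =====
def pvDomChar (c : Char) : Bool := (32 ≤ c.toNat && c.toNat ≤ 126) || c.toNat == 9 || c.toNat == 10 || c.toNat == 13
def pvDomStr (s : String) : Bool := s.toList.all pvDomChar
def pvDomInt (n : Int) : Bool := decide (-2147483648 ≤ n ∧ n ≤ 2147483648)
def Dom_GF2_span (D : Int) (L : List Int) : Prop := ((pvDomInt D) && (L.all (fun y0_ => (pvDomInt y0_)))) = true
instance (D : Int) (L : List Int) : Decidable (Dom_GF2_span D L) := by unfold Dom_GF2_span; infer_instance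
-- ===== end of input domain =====

-- B replaces A's per-bitmask string-formatted binary expansion by an incremental
-- reachable-sum set grown element by element with per-step deduplication (faster).

-- ===== PORT A =====
-- [int(d) for d in str(bin(x))[2:]]  — exact for x ≥ 0 (the only values A feeds it)
def pvBinNat (n : Nat) : List Int :=
  if _h : n < 2 then [(n : Int)] else pvBinNat (n / 2) ++ [((n % 2 : Nat) : Int)]
decreasing_by omega

-- while(len(l) != t): l = [0] + l  — Python diverges if len(l) > t, unreachable at A's call sites
def pvPad (t : Nat) (l : List Int) : List Int :=
  if h : l.length < t then pvPad t ((0 : Int) :: l) else l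
termination_by t - l.length
decreasing_by simp only [List.length_cons]; omega

def bin2list (x : Int) (t : Int) : List Int := pvPad t.toNat (pvBinNat x.toNat)

def GF2_span (D : Int) (L : List Int) : List Int :=
  let resposta : PySem.Set Int := PySem.Set.empty
  let tamanho : Int := L.length
  let lamb : Int := (2 : Int) ^ L.length - 1   -- 2**tamanho - 1
  if tamanho == 0 then []   -- Python's `{set()}` raises TypeError (set is unhashable); excluded by Pre_
  else
    (((PySem.List.pyRange 0 (lamb + 1) 1).foldl
      (fun (st : PySem.Set Int × Int) _i =>
        let c := bin2list st.2 tamanho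
        let u := ((PySem.List.pyRange 0 tamanho 1).map
          (fun j => PySem.List.pyGetD c j 0 * PySem.List.pyGetD L j 0)).sum
        (PySem.Set.add st.1 u, st.2 - 1))
      (resposta, lamb))).1

-- ===== PORT B =====
def GF2_span_alt (D : Int) (L : List Int) : List Int :=
  PySem.Set.ofList
    (L.reverse.foldl
      (fun sums x => PySem.List.dedup (sums.map (fun t => x + t) ++ sums))
      [0])

-- ===== PRECONDITION & SPEC =====
-- On L = [] the Python A raises TypeError ({set()} contains an unhashable set), so it is excluded.
def Pre_GF2_span (D : Int) (L : List Int) : Prop := L ≠ []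
instance (D : Int) (L : List Int) : Decidable (Pre_GF2_span D L) := by unfold Pre_GF2_span; infer_instance
def pvWitness_GF2_span : Int × List Int := (0, [1, 2])

def Spec_GF2_span (D : Int) (L : List Int) (out : List Int) : Prop := out = GF2_span_alt D L
instance (D : Int) (L : List Int) (out : List Int) : Decidable (Spec_GF2_span D L out) := by unfold Spec_GF2_span; infer_instance

-- ===== CLAIM (what is proved, stated in full; the proofs are below) =====
def Claim_equal_GF2_span : Prop := ∀ (D : Int) (L : List Int), Dom_GF2_span D L → Pre_GF2_span D L → Spec_GF2_span D L (GF2_span D L)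

-- ===== LEMMAS AND PROOFS =====

-- the subset-sum sequence in A's (descending-bitmask) enumeration order, with duplicates
def pvSeq : List Int → List Int
  | [] => [0]
  | x :: r => (pvSeq r).map (fun t => x + t) ++ pvSeq r

-- binary digits of m, MSB first, padded to width t (defined for m < 2^t)
def pvBits : Nat → Nat → List Int
  | 0, _ => []
  | t + 1, m => if m < 2 ^ t then 0 :: pvBits t m else 1 :: pvBits t (m - 2 ^ t)

def pvDot (c l : List Int) : Int := (List.zipWith (· * ·) c l).sum

def pvU (L : List Int) (m : Int) : Int :=
  ((PySem.List.pyRange 0 (L.length : Int) 1).map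
    (fun j => PySem.List.pyGetD (bin2list m (L.length : Int)) j 0 * PySem.List.pyGetD L j 0)).sum

theorem pvPad_eq (t : Nat) (l : List Int) (h : l.length ≤ t) :
    pvPad t l = List.replicate (t - l.length) 0 ++ l := by
  obtain ⟨k, hk⟩ : ∃ k, t - l.length = k := ⟨_, rfl⟩
  induction k generalizing l with
  | zero =>
    rw [pvPad, dif_neg (by omega), hk]
    simp
  | succ k ih =>
    rw [pvPad, dif_pos (by omega)]
    rw [ih ((0 : Int) :: l) (by simp; omega) (by simp; omega)]
    have h1 : t - l.length = (t - ((0 : Int) :: l).length) + 1 := by simp; omega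
    rw [h1, List.replicate_succ', List.append_assoc]
    rfl

theorem pvBinNat_lt2 (m : Nat) (h : m < 2) : pvBinNat m = [(m : Int)] := by
  rw [pvBinNat, dif_pos h]

theorem pvBinNat_ge2 (m : Nat) (h : ¬ m < 2) :
    pvBinNat m = pvBinNat (m / 2) ++ [((m % 2 : Nat) : Int)] := by
  rw [pvBinNat, dif_neg h]

theorem pvBinNat_length (m t : Nat) (ht : 1 ≤ t) (hm : m < 2 ^ t) :
    (pvBinNat m).length ≤ t := by
  induction m using Nat.strong_induction_on generalizing t with
  | _ m ih =>
    by_cases h2 : m < 2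
    · rw [pvBinNat_lt2 m h2]; simpa using ht
    · rw [pvBinNat_ge2 m h2]
      have ht2 : 2 ≤ t := by
        by_contra hc
        have : t = 1 := by omega
        subst this; simp at hm; omega
      have hp : 2 ^ t = 2 * 2 ^ (t - 1) := by
        conv_lhs => rw [show t = (t - 1) + 1 by omega]
        rw [pow_succ, Nat.mul_comm]
      have hlt : m / 2 < 2 ^ (t - 1) := by omega
      have := ih (m / 2) (by omega) (t - 1) (by omega) hlt
      simp only [List.length_append, List.length_cons, List.length_nil]
      omega

theorem pvBinNat_high (t m : Nat) (ht : 1 ≤ t) (hm : m < 2 ^ t) :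
    pvBinNat (2 ^ t + m) = 1 :: (List.replicate (t - (pvBinNat m).length) 0 ++ pvBinNat m) := by
  induction t generalizing m with
  | zero => omega
  | succ t ih =>
    by_cases ht0 : t = 0
    · subst ht0
      norm_num at hm ⊢
      rw [pvBinNat_ge2 (2 + m) (by omega), show (2 + m) / 2 = 1 by omega,
        show (2 + m) % 2 = m by omega, pvBinNat_lt2 1 (by omega), pvBinNat_lt2 m (by omega)]
      norm_num
    · have ht1 : 1 ≤ t := by omega
      have hp : 2 ^ (t + 1) = 2 * 2 ^ t := by ring
      rw [pvBinNat_ge2 _ (by omega)]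
      have hdiv : (2 ^ (t + 1) + m) / 2 = 2 ^ t + m / 2 := by omega
      have hmod : (2 ^ (t + 1) + m) % 2 = m % 2 := by omega
      rw [hdiv, hmod, ih (m / 2) ht1 (by omega)]
      by_cases hm2 : m < 2
      · rw [show m / 2 = 0 by omega, pvBinNat_lt2 0 (by omega), pvBinNat_lt2 m hm2,
          show m % 2 = m by omega]
        simp only [List.length_cons, List.length_nil, Nat.cast_zero, List.cons_append]
        have hrep : List.replicate (t - (0 + 1)) (0 : Int) ++ [(0 : Int)] = List.replicate t 0 := by
          rw [← List.replicate_succ']; congr 1; omega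
        rw [hrep, show t + 1 - (0 + 1) = t by omega]
      · rw [pvBinNat_ge2 m hm2]
        simp only [List.length_append, List.length_cons, List.length_nil, List.cons_append]
        rw [show t + 1 - ((pvBinNat (m / 2)).length + 0 + 1) = t - ((pvBinNat (m / 2)).length + 0)
          by omega]
        simp [List.append_assoc]

theorem pvBinNat_pad_eq_bits (t m : Nat) (ht : 1 ≤ t) (hm : m < 2 ^ t) :
    List.replicate (t - (pvBinNat m).length) 0 ++ pvBinNat m = pvBits t m := by
  induction t generalizing m with
  | zero => omega
  | succ t ih =>
    by_cases ht0 : t = 0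
    · subst ht0
      norm_num at hm ⊢
      interval_cases m <;> rw [pvBinNat_lt2 _ (by omega)] <;> simp [pvBits]
    · have ht1 : 1 ≤ t := by omega
      by_cases hlow : m < 2 ^ t
      · have hlen : (pvBinNat m).length ≤ t := pvBinNat_length m t ht1 hlow
        have h1 : t + 1 - (pvBinNat m).length = (t - (pvBinNat m).length) + 1 := by omega
        rw [h1, List.replicate_succ, List.cons_append, ih m ht1 hlow]
        rw [pvBits]
        rw [if_pos hlow]
      · have hm' : m - 2 ^ t < 2 ^ t := by
          have : 2 ^ (t + 1) = 2 * 2 ^ t := by ring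
          omega
        have hsplit : m = 2 ^ t + (m - 2 ^ t) := by omega
        rw [pvBits, if_neg hlow]
        conv_lhs => rw [hsplit]
        rw [pvBinNat_high t (m - 2 ^ t) ht1 hm']
        have hlen' : (pvBinNat (m - 2 ^ t)).length ≤ t := pvBinNat_length _ t ht1 hm'
        have hlenfull :
            (1 :: (List.replicate (t - (pvBinNat (m - 2 ^ t)).length) (0 : Int) ++
              pvBinNat (m - 2 ^ t))).length = t + 1 := by
          simp; omega
        rw [hlenfull]
        simp only [Nat.sub_self, List.replicate_zero, List.nil_append]
        rw [ih (m - 2 ^ t) ht1 hm']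

theorem bin2list_eq_bits (m t : Nat) (ht : 1 ≤ t) (hm : m < 2 ^ t) :
    bin2list (m : Int) (t : Int) = pvBits t m := by
  unfold bin2list
  rw [Int.toNat_natCast, Int.toNat_natCast]
  rw [pvPad_eq t (pvBinNat m) (pvBinNat_length m t ht hm)]
  exact pvBinNat_pad_eq_bits t m ht hm

theorem pvBits_length (t m : Nat) : (pvBits t m).length = t := by
  induction t generalizing m with
  | zero => rfl
  | succ t ih => rw [pvBits]; split <;> simp [ih]

theorem getD_dot (l c : List Int) (h : c.length = l.length) :
    ((List.range l.length).map (fun k => c.getD k 0 * l.getD k 0)).sum = pvDot c l := by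
  induction l generalizing c with
  | nil => simp [pvDot]
  | cons y r ih =>
    cases c with
    | nil => simp at h
    | cons a cc =>
      rw [List.length_cons, List.range_succ_eq_map, List.map_cons, List.map_map]
      simp only [Function.comp_def, Nat.succ_eq_add_one, List.getD_cons_zero,
        List.getD_cons_succ, List.sum_cons]
      rw [ih cc (by simpa using h)]
      rfl

theorem sum_range_eq_dot (l c : List Int) (h : c.length = l.length) :
    ((PySem.List.pyRange 0 (l.length : Int) 1).map
      (fun j => PySem.List.pyGetD c j 0 * PySem.List.pyGetD l j 0)).sum = pvDot c l := by
  rw [PySem.List.pyRange_one, List.map_map]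
  have h0 : ((l.length : Int) - 0).toNat = l.length := by simp
  rw [h0]
  simp only [Function.comp_def, zero_add, PySem.List.pyGetD_natCast]
  exact getD_dot l c h

theorem foldl_const {σ : Type} (g : σ → σ) (l : List Int) (s : σ) :
    l.foldl (fun st _ => g st) s = g^[l.length] s := by
  induction l generalizing s with
  | nil => rfl
  | cons x xs ih => rw [List.foldl_cons, List.length_cons, Function.iterate_succ_apply]; exact ih _

theorem iterA (L : List Int) (k : Nat) (s : PySem.Set Int) (m : Int) :
    (fun (st : PySem.Set Int × Int) => (PySem.Set.add st.1 (pvU L st.2), st.2 - 1))^[k] (s, m)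
      = (PySem.Set.update s ((List.range k).map (fun i : Nat => pvU L (m - (i : Int)))), m - k) := by
  induction k with
  | zero => simp [PySem.Set.update_nil]
  | succ k ih =>
    rw [Function.iterate_succ_apply', ih]
    simp only [List.range_succ, List.map_append, List.map_cons, List.map_nil,
      PySem.Set.update_append, PySem.Set.update_cons, PySem.Set.update_nil, Prod.mk.injEq]
    exact ⟨trivial, by push_cast; ring⟩

theorem pvU_eq_dot (L : List Int) (hL : L ≠ []) (i : Nat) (hi : i < 2 ^ L.length) :
    pvU L ((2 : Int) ^ L.length - 1 - (i : Int))
      = pvDot (pvBits L.length (2 ^ L.length - 1 - i)) L := by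
  have hn : 1 ≤ L.length := by
    cases L with
    | nil => exact absurd rfl hL
    | cons a as => simp
  have h2 : ((2 ^ L.length : Nat) : Int) = (2 : Int) ^ L.length := by push_cast; ring
  have hcast : (2 : Int) ^ L.length - 1 - (i : Int) = ((2 ^ L.length - 1 - i : Nat) : Int) := by
    omega
  unfold pvU
  rw [hcast, bin2list_eq_bits (2 ^ L.length - 1 - i) L.length hn (by omega)]
  exact sum_range_eq_dot L _ (by rw [pvBits_length])

theorem descAll (L : List Int) :
    (List.range (2 ^ L.length)).map (fun i => pvDot (pvBits L.length (2 ^ L.length - 1 - i)) L)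
      = pvSeq L := by
  induction L with
  | nil => simp [pvSeq, pvBits, pvDot]
  | cons x r ih =>
    simp only [List.length_cons]
    have hsplit : 2 ^ (r.length + 1) = 2 ^ r.length + 2 ^ r.length := by
      rw [pow_succ]; ring
    rw [hsplit, List.range_add, List.map_append, List.map_map]
    have hseq : pvSeq (x :: r) = (pvSeq r).map (fun t => x + t) ++ pvSeq r := rfl
    rw [hseq]
    congr 1
    · have h1 : ∀ i ∈ List.range (2 ^ r.length),
          pvDot (pvBits (r.length + 1) (2 ^ r.length + 2 ^ r.length - 1 - i)) (x :: r)
            = x + pvDot (pvBits r.length (2 ^ r.length - 1 - i)) r := by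
        intro i hi
        rw [List.mem_range] at hi
        rw [pvBits, if_neg (by omega),
          show 2 ^ r.length + 2 ^ r.length - 1 - i - 2 ^ r.length = 2 ^ r.length - 1 - i by omega]
        simp [pvDot]
      rw [List.map_congr_left h1, show
        (List.range (2 ^ r.length)).map (fun i => x + pvDot (pvBits r.length (2 ^ r.length - 1 - i)) r)
          = ((List.range (2 ^ r.length)).map
              (fun i => pvDot (pvBits r.length (2 ^ r.length - 1 - i)) r)).map (fun t => x + t) by
        rw [List.map_map]; rfl, ih]
    · simp only [Function.comp_def]
      have h2 : ∀ i ∈ List.range (2 ^ r.length),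
          pvDot (pvBits (r.length + 1) (2 ^ r.length + 2 ^ r.length - 1 - (2 ^ r.length + i)))
              (x :: r)
            = pvDot (pvBits r.length (2 ^ r.length - 1 - i)) r := by
        intro i hi
        rw [List.mem_range] at hi
        rw [show 2 ^ r.length + 2 ^ r.length - 1 - (2 ^ r.length + i) = 2 ^ r.length - 1 - i
          by omega]
        rw [pvBits, if_pos (by omega)]
        simp [pvDot]
      rw [List.map_congr_left h2, ih]

theorem A_eq_ofList_seq (D : Int) (L : List Int) (hL : L ≠ []) :
    GF2_span D L = PySem.Set.ofList (pvSeq L) := by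
  have hn : 1 ≤ L.length := by
    cases L with
    | nil => exact absurd rfl hL
    | cons a as => simp
  unfold GF2_span
  have hfalse : (((L.length : Int)) == 0) = false := by
    simp only [beq_eq_false_iff_ne, ne_eq, Nat.cast_eq_zero]
    omega
  simp only [hfalse, Bool.false_eq_true, if_false]
  change (List.foldl
      (fun (st : PySem.Set Int × Int) (_i : Int) =>
        (PySem.Set.add st.1 (pvU L st.2), st.2 - 1))
      (PySem.Set.empty, (2 : Int) ^ L.length - 1)
      (PySem.List.pyRange 0 ((2 : Int) ^ L.length - 1 + 1) 1)).1 = _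
  rw [foldl_const (fun st : PySem.Set Int × Int =>
    (PySem.Set.add st.1 (pvU L st.2), st.2 - 1))]
  rw [PySem.List.length_pyRange_one]
  have h2 : ((2 ^ L.length : Nat) : Int) = (2 : Int) ^ L.length := by push_cast; ring
  have hpos : (0 : Int) < 2 ^ L.length := by positivity
  have hlen : ((2 : Int) ^ L.length - 1 + 1 - 0).toNat = 2 ^ L.length := by omega
  rw [hlen, iterA]
  rw [PySem.Set.update_empty]
  rw [List.map_congr_left (fun i hi => pvU_eq_dot L hL i (List.mem_range.1 hi)), descAll]

-- B side
theorem discard_map (f : Int → Int) (hf : Function.Injective f) (s : List Int) (y : Int) :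
    PySem.Set.discard (s.map f) (f y) = (PySem.Set.discard s y).map f := by
  unfold PySem.Set.discard
  rw [List.filter_map]
  congr 1
  apply List.filter_congr
  intro a _
  simp only [Function.comp_apply]
  by_cases h : a = y
  · subst h; simp
  · have : f a ≠ f y := fun hc => h (hf hc)
    simp [h, this]

theorem ofList_map (f : Int → Int) (hf : Function.Injective f) (S : List Int) :
    PySem.Set.ofList (S.map f) = (PySem.Set.ofList S).map f := by
  induction S with
  | nil => rfl
  | cons y S ih =>
    rw [List.map_cons, PySem.Set.ofList_cons, PySem.Set.ofList_cons, ih,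
      discard_map f hf, List.map_cons]

theorem update_ofList (s : PySem.Set Int) (b : List Int) :
    PySem.Set.update s (PySem.Set.ofList b) = PySem.Set.update s b := by
  rw [PySem.Set.update_eq_append_filter, PySem.Set.update_eq_append_filter,
    PySem.Set.ofList_ofList]

theorem B_eq_ofList_seq (D : Int) (L : List Int) :
    GF2_span_alt D L = PySem.Set.ofList (pvSeq L) := by
  unfold GF2_span_alt
  rw [List.foldl_reverse]
  have key : L.foldr (fun x sums => PySem.List.dedup (sums.map (fun t => x + t) ++ sums)) [0]
      = PySem.Set.ofList (pvSeq L) := by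
    induction L with
    | nil => simp [pvSeq, PySem.Set.ofList]
    | cons x r ih =>
      rw [List.foldr_cons, ih, PySem.List.dedup_eq_ofList]
      have hinj : Function.Injective (fun t : Int => x + t) := fun a b h => by
        simpa using h
      calc PySem.Set.ofList
            ((PySem.Set.ofList (pvSeq r)).map (fun t => x + t) ++ PySem.Set.ofList (pvSeq r))
          = PySem.Set.update
              (PySem.Set.ofList ((PySem.Set.ofList (pvSeq r)).map (fun t => x + t)))
              (PySem.Set.ofList (pvSeq r)) := PySem.Set.ofList_append _ _
        _ = PySem.Set.update (PySem.Set.ofList ((pvSeq r).map (fun t => x + t))) (pvSeq r) := by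
              rw [update_ofList, ← ofList_map _ hinj, PySem.Set.ofList_ofList]
        _ = PySem.Set.ofList ((pvSeq r).map (fun t => x + t) ++ pvSeq r) :=
              (PySem.Set.ofList_append _ _).symm
        _ = PySem.Set.ofList (pvSeq (x :: r)) := rfl
  rw [key, PySem.Set.ofList_ofList]

-- ===== VERDICT (by name: the statement is the Claim_ definition above) =====
theorem GF2_span_spec : Claim_equal_GF2_span := by
  intro D L _hDom hPre
  unfold Spec_GF2_span
  rw [A_eq_ofList_seq D L hPre, B_eq_ofList_seq]
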